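-- pv_equiv track=rewrite | github.com/Pianissimo-3115/EEG-project | Part1_eyeblink_to_finger/CNN_model/RDA.py | SplitString
-- ===== SOURCE A (Python) =====
-- def SplitString(raw):
--     stringlist = []
--     s = ""
--     for i in range(len(raw)):
--         if raw[i] != 0:
--             s = s + chr(raw[i])
--         else:
--             stringlist.append(s)
--             s = ""
--
--     return stringlist
-- ===== SOURCE B (Python) =====
-- def SplitString(raw):
--     s = "".join(chr(b) for b in raw)
--     return s.split("\x00")[:-1]
-- ===== Notes on version B (the rewrite author's own statement) =====
-- stated objective: idiomatic
-- what changed: Replaces the char-by-char accumulate-and-flush state machine with a two-phase computation: build the whole decoded string once with ''.join(chr(b) for b in raw), then use the library split('\x00') and drop the trailing segment with [:-1].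
import Mathlib
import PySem

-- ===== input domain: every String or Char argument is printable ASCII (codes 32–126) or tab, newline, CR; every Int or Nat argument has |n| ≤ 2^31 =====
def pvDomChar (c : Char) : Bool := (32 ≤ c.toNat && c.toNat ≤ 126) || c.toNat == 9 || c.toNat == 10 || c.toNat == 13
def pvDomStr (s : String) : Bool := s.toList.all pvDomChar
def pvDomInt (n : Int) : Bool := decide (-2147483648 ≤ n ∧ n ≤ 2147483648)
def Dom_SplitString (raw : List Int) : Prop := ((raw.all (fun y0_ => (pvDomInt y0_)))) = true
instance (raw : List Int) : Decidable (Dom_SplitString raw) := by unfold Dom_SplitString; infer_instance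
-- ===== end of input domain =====

-- B builds the whole decoded char list once and uses the library split (dropping the
-- trailing segment) instead of A's char-by-char accumulate-and-flush state machine.


-- ===== PORT A =====
-- literal port of A: fold over raw carrying (stringlist, s); the in-progress Python str s is
-- kept as a List Char (the PySem representation of strings) and frozen to String when appended;
-- chr(b) = Char.ofNat b.toNat
def SplitString (raw : List Int) : List String :=
  (raw.foldl
    (fun (q : List String × List Char) b =>
      if b ≠ 0 then (q.1, q.2 ++ [Char.ofNat b.toNat])
      else (q.1 ++ [String.ofList q.2], []))
    ([], [])).1

-- ===== PORT B =====
-- port of B: build the full decoded char list, split on the NUL char, drop the last piece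
def SplitString_alt (raw : List Int) : List String :=
  (((raw.map (fun b => Char.ofNat b.toNat)).splitOnP (· == Char.ofNat 0)).map
      (fun t => String.ofList t)).dropLast

-- ===== PRECONDITION & SPEC =====
-- Pre_ excludes elements outside range(0x110000) and negatives, where Python's chr (in both A
-- and B) raises ValueError, and also the surrogate code points 0xD800–0xDFFF, on which A returns
-- a lone-surrogate string that is not representable as a Lean String under the type convention.
def Pre_SplitString (raw : List Int) : Prop :=
  ∀ b ∈ raw, (0 ≤ b ∧ b < 55296) ∨ (57344 ≤ b ∧ b < 1114112)
instance (raw : List Int) : Decidable (Pre_SplitString raw) := by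
  unfold Pre_SplitString; infer_instance
def pvWitness_SplitString : List Int := [72, 105, 0, 33, 0]
def Spec_SplitString (raw : List Int) (out : List String) : Prop := out = SplitString_alt raw
instance (raw : List Int) (out : List String) : Decidable (Spec_SplitString raw out) := by
  unfold Spec_SplitString; infer_instance

-- ===== CLAIM (what is proved, stated in full; the proofs are below) =====
def Claim_equal_SplitString : Prop :=
  ∀ (raw : List Int), Dom_SplitString raw → Pre_SplitString raw →
    Spec_SplitString raw (SplitString raw)

-- ===== LEMMAS AND PROOFS =====

-- splitting at the first separator after a separator-free prefix
theorem pv_splitOnP_sep_mid (p : Char → Bool) (y : Char) (hy : p y = true)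
    (cs : List Char) : ∀ (s : List Char), (∀ x ∈ s, ¬ p x = true) →
    (s ++ y :: cs).splitOnP p = s :: cs.splitOnP p := by
  intro s
  induction s with
  | nil => intro _; simp [List.splitOnP_cons, hy]
  | cons a s ih =>
    intro h
    have ha : ¬ p a = true := h a (List.mem_cons_self)
    have := ih (fun x hx => h x (List.mem_cons_of_mem a hx))
    simp [List.splitOnP_cons, ha, this]

-- the FSM of A (over chars) computes acc ++ all-but-last of the library split
theorem pv_fsm_eq (cs : List Char) : ∀ (acc : List String) (s : List Char),
    (∀ x ∈ s, ¬ (x == Char.ofNat 0) = true) →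
    (cs.foldl
      (fun (q : List String × List Char) c =>
        if c ≠ Char.ofNat 0 then (q.1, q.2 ++ [c])
        else (q.1 ++ [String.ofList q.2], []))
      (acc, s)).1
    = acc ++ (((s ++ cs).splitOnP (· == Char.ofNat 0)).map (fun t => String.ofList t)).dropLast := by
  induction cs with
  | nil =>
    intro acc s h
    rw [List.foldl_nil, List.append_nil,
      List.splitOnP_eq_single _ _ h]
    simp
  | cons c cs ih =>
    intro acc s h
    by_cases hc : c = Char.ofNat 0
    · subst hc
      rw [List.foldl_cons, if_neg (by simp)]
      rw [ih (acc ++ [String.ofList s]) [] (by simp),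
        pv_splitOnP_sep_mid (· == Char.ofNat 0) (Char.ofNat 0) (by simp) cs s h]
      have hne : ((cs.splitOnP (· == Char.ofNat 0)).map (fun t => String.ofList t)) ≠ [] := by
        simp [List.splitOnP_ne_nil]
      rw [List.map_cons, List.dropLast_cons_of_ne_nil hne]
      simp
    · rw [List.foldl_cons, if_pos (by simpa using hc)]
      have hs : ∀ x ∈ s ++ [c], ¬ (x == Char.ofNat 0) = true := by
        intro x hx
        rcases List.mem_append.mp hx with hx | hx
        · exact h x hx
        · simp only [List.mem_singleton] at hx; subst hx; simpa using hc
      rw [ih acc (s ++ [c]) hs, List.append_assoc]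
      simp

-- on Pre_, the Int-level test b = 0 agrees with the char-level test Char.ofNat b.toNat = NUL
theorem pv_char_zero_iff (b : Int)
    (hb : (0 ≤ b ∧ b < 55296) ∨ (57344 ≤ b ∧ b < 1114112)) :
    (Char.ofNat b.toNat = Char.ofNat 0) ↔ b = 0 := by
  constructor
  · intro hmk
    have hval : b.toNat.isValidChar := by
      rcases hb with ⟨h0, h1⟩ | ⟨h0, h1⟩
      · exact Or.inl (by omega)
      · exact Or.inr ⟨by omega, by omega⟩
    have h2 := congrArg Char.toNat hmk
    rw [Char.toNat_ofNat, if_pos hval] at h2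
    simp at h2
    omega
  · intro hb0; subst hb0; rfl

-- ===== VERDICT (by name: the statement is the Claim_ definition above) =====
theorem SplitString_spec : Claim_equal_SplitString := by
  intro raw _ hpre
  unfold Spec_SplitString SplitString SplitString_alt
  have hcongr :
      raw.foldl
        (fun (q : List String × List Char) b =>
          if b ≠ 0 then (q.1, q.2 ++ [Char.ofNat b.toNat])
          else (q.1 ++ [String.ofList q.2], []))
        ([], [])
      = raw.foldl
        (fun (q : List String × List Char) b =>
          if Char.ofNat b.toNat ≠ Char.ofNat 0 then (q.1, q.2 ++ [Char.ofNat b.toNat])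
          else (q.1 ++ [String.ofList q.2], []))
        ([], []) := by
    apply PySem.List.foldl_congr_mem
    intro q b hbmem
    have hiff := pv_char_zero_iff b (hpre b hbmem)
    by_cases hb : b = 0
    · subst hb; simp
    · rw [if_pos hb, if_pos (fun hch => hb (hiff.mp hch))]
  rw [hcongr]
  simpa [List.foldl_map] using
    pv_fsm_eq (raw.map (fun b => Char.ofNat b.toNat)) [] [] (by simp)
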